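-- pv_equiv track=rewrite | github.com/davidhaohanli/Image_Captioning | prepare.py | train_test_desc
-- ===== SOURCE A (Python) =====
-- def train_test_desc(descriptions,train_id,test_id):
--     train_descriptions = dict()
--     test_descriptions = dict()
--     for img,desc in descriptions.items():
--         if img in train_id:
--             train_descriptions[img] = desc
--         if img in test_id:
--             test_descriptions[img] = desc
--     return train_descriptions,test_descriptions
-- ===== SOURCE B (Python) =====
-- def train_test_desc(descriptions, train_id, test_id):
--     train_set = set(train_id)
--     test_set = set(test_id)
--     train_descriptions = dict(descriptions)
--     for img in list(train_descriptions):
--         if img not in train_set: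
--             del train_descriptions[img]
--     test_descriptions = dict(descriptions)
--     for img in list(test_descriptions):
--         if img not in test_set:
--             del test_descriptions[img]
--     return train_descriptions, test_descriptions
-- ===== Notes on version B (the rewrite author's own statement) =====
-- stated objective: alternative
-- what changed: B builds each result subtractively: it copies the whole descriptions dict and deletes the keys outside the id set, instead of A's additive single pass that tests each key by list membership and inserts matches into two fresh dicts; membership moves from O(|ids|) list scans to set lookups.
import Mathlib
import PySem

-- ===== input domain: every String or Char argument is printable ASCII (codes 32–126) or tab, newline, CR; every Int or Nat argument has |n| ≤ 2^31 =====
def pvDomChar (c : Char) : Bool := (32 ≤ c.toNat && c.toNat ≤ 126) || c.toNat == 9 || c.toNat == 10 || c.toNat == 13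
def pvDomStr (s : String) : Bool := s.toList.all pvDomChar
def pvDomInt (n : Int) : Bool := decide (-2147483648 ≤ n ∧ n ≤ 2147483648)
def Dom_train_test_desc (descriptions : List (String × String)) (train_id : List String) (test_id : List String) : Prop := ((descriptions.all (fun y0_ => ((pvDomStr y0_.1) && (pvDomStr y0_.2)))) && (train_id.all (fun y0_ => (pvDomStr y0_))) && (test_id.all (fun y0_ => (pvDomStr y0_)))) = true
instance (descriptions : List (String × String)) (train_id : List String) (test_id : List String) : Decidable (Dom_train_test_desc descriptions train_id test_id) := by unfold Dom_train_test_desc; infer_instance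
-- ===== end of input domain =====

-- ===== PORT A =====
-- B is subtractive (copy the dict, delete the complement of the id set) where A is additive
-- (insert each matching item into fresh dicts); return-value equivalence proved below.
-- one pass over descriptions.items(), conditionally inserting into the two accumulator dicts
def train_test_desc (descriptions : List (String × String)) (train_id : List String) (test_id : List String) : (List (String × String)) × (List (String × String)) :=
  let p := descriptions.foldl
    (fun (st : PySem.Dict String String × PySem.Dict String String) pr =>
      let st1 := if train_id.contains pr.1 then (st.1.insert pr.1 pr.2, st.2) else st
      if test_id.contains pr.1 then (st1.1, st1.2.insert pr.1 pr.2) else st1)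
    (PySem.Dict.empty, PySem.Dict.empty)
  (p.1.items, p.2.items)

-- ===== PORT B =====
-- 'd = dict(descriptions); for img in list(d): if img not in s: del d[img]'
def pvPrune (s : PySem.Set String) (descriptions : List (String × String)) : PySem.Dict String String :=
  let dd := PySem.Dict.ofList descriptions
  dd.keys.foldl (fun d k => if s.contains k then d else d.erase k) dd

def train_test_desc_alt (descriptions : List (String × String)) (train_id : List String) (test_id : List String) : (List (String × String)) × (List (String × String)) :=
  let trainSet : PySem.Set String := PySem.Set.ofList train_id
  let testSet : PySem.Set String := PySem.Set.ofList test_id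
  ((pvPrune trainSet descriptions).items, (pvPrune testSet descriptions).items)

-- ===== PRECONDITION & SPEC =====
def Spec_train_test_desc (descriptions : List (String × String)) (train_id : List String) (test_id : List String) (out : (List (String × String)) × (List (String × String))) : Prop := out = train_test_desc_alt descriptions train_id test_id
instance (descriptions : List (String × String)) (train_id : List String) (test_id : List String) (out : (List (String × String)) × (List (String × String))) : Decidable (Spec_train_test_desc descriptions train_id test_id out) := by unfold Spec_train_test_desc; infer_instance

-- ===== CLAIM (what is proved, stated in full; the proofs are below) =====
def Claim_equal_train_test_desc : Prop := ∀ (descriptions : List (String × String)) (train_id : List String) (test_id : List String), Dom_train_test_desc descriptions train_id test_id → Spec_train_test_desc descriptions train_id test_id (train_test_desc descriptions train_id test_id)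

-- ===== LEMMAS AND PROOFS =====

-- A's paired fold equals the two independent folds over the filtered lists.
theorem pv_pair_fold (l : List (String × String)) (p q : String → Bool)
    (tr te : PySem.Dict String String) :
    l.foldl
      (fun (st : PySem.Dict String String × PySem.Dict String String) pr =>
        let st1 := if p pr.1 then (st.1.insert pr.1 pr.2, st.2) else st
        if q pr.1 then (st1.1, st1.2.insert pr.1 pr.2) else st1)
      (tr, te)
    = ((l.filter (fun pr => p pr.1)).foldl
        (fun (d : PySem.Dict String String) pr => d.insert pr.1 pr.2) tr,
       (l.filter (fun pr => q pr.1)).foldl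
        (fun (d : PySem.Dict String String) pr => d.insert pr.1 pr.2) te) := by
  induction l generalizing tr te with
  | nil => rfl
  | cons hd tl ih =>
    simp only [List.foldl_cons, List.filter_cons]
    by_cases hp : p hd.1 <;> by_cases hq : q hd.1 <;>
      simp [hp, hq, ih]

-- The delete loop over a key list keeps exactly the items whose key satisfies p or is absent from ks.
theorem pv_erase_fold (p : String → Bool) (ks : List String) (d : PySem.Dict String String) :
    (ks.foldl (fun d k => if p k then d else d.erase k) d).items
    = d.items.filter (fun pr => p pr.1 || !(ks.contains pr.1)) := by
  induction ks generalizing d with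
  | nil => simp
  | cons k ks ih =>
    simp only [List.foldl_cons]
    by_cases hp : p k
    · rw [if_pos hp, ih]
      apply List.filter_congr
      intro pr _
      by_cases h : pr.1 = k <;> simp [h, hp]
    · rw [if_neg hp, ih]
      show ((d.erase k).items.filter _) = _
      simp only [PySem.Dict.erase, List.filter_filter]
      apply List.filter_congr
      intro pr _
      by_cases h : pr.1 = k <;> simp [h, hp]

-- Inserting one item commutes with key-filtering the dict.
theorem pv_ins_filter (p : String → Bool) (d e : PySem.Dict String String) (k : String) (v : String)
    (h : d.items.filter (fun pr => p pr.1) = e.items) :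
    (d.insert k v).items.filter (fun pr => p pr.1)
    = (if p k then (e.insert k v).items else e.items) := by
  have hc : e.contains k = d.items.any (fun pr => p pr.1 && pr.1 == k) := by
    simp [PySem.Dict.contains, ← h, List.any_filter]
  by_cases hp : p k
  · have hce : e.contains k = d.contains k := by
      rw [hc]
      simp only [PySem.Dict.contains]
      congr 1
      funext pr
      by_cases hk : pr.1 = k <;> simp [hk, hp]
    rw [if_pos hp]
    by_cases hdc : d.contains k
    · rw [PySem.Dict.items_insert_of_contains _ _ hdc,
          PySem.Dict.items_insert_of_contains _ _ (by rw [hce, hdc])]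
      rw [← h, List.filter_map]
      congr 1
      apply List.filter_congr
      intro pr _
      by_cases hk : pr.1 = k <;> simp [hk, hp]
    · rw [PySem.Dict.items_insert_of_not_contains _ _ (by simp [hdc]),
          PySem.Dict.items_insert_of_not_contains _ _ (by simp [hce, hdc])]
      simp [hp, h]
  · rw [if_neg hp, ← h]
    by_cases hdc : d.contains k
    · rw [PySem.Dict.items_insert_of_contains _ _ hdc, List.filter_map]
      have : (List.filter ((fun pr : String × String => p pr.1) ∘
          fun pr => if pr.1 == k then (k, v) else pr) d.items)
          = d.items.filter (fun pr => p pr.1) := by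
        apply List.filter_congr
        intro pr _
        by_cases hk : pr.1 = k <;> simp [hk, hp]
      rw [this]
      have hid : List.map (fun pr : String × String => if (pr.1 == k) = true then (k, v) else pr)
          (List.filter (fun pr => p pr.1) d.items)
          = List.map id (List.filter (fun pr => p pr.1) d.items) := by
        apply List.map_congr_left
        intro pr hpr
        have hppr : p pr.1 := (List.mem_filter.mp hpr).2
        have hne : pr.1 ≠ k := fun hk => hp (hk ▸ hppr)
        simp [hne]
      rw [hid, List.map_id]
    · rw [PySem.Dict.items_insert_of_not_contains _ _ (by simp [hdc])]
      simp [hp]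

-- Filtering the dict built from l equals the dict built from the filtered l.
theorem pv_fold_filter (p : String → Bool) (l : List (String × String)) :
    (PySem.Dict.ofList l).items.filter (fun pr => p pr.1)
    = ((l.filter (fun pr => p pr.1)).foldl
        (fun (d : PySem.Dict String String) pr => d.insert pr.1 pr.2) PySem.Dict.empty).items := by
  induction l using List.reverseRecOn with
  | nil => rfl
  | append_singleton l pr ih =>
    have hup : PySem.Dict.ofList (l ++ [pr])
        = (PySem.Dict.ofList l).insert pr.1 pr.2 := by
      simp [PySem.Dict.ofList, PySem.Dict.update, List.foldl_append]
    rw [hup, pv_ins_filter p _ _ pr.1 pr.2 (by rw [ih]), List.filter_append, List.foldl_append]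
    by_cases hp : p pr.1 <;> simp [hp]

-- B's prune of (ofList l) keyed by p yields the filtered-fold items.
theorem pv_prune_items (p : String → Bool) (l : List (String × String)) :
    ((PySem.Dict.ofList l).keys.foldl
        (fun (d : PySem.Dict String String) k => if p k then d else d.erase k)
        (PySem.Dict.ofList l)).items
    = ((l.filter (fun pr => p pr.1)).foldl
        (fun (d : PySem.Dict String String) pr => d.insert pr.1 pr.2) PySem.Dict.empty).items := by
  rw [pv_erase_fold, ← pv_fold_filter]
  apply List.filter_congr
  intro pr hpr
  have : pr.1 ∈ (PySem.Dict.ofList l).keys := by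
    simp only [PySem.Dict.keys]
    exact List.mem_map_of_mem hpr
  simp [this]

-- ===== VERDICT (by name: the statement is the Claim_ definition above) =====
theorem train_test_desc_spec : Claim_equal_train_test_desc := by
  intro descriptions train_id test_id _
  unfold Spec_train_test_desc train_test_desc train_test_desc_alt pvPrune
  have hmem : ∀ (ids : List String) (x : String),
      (PySem.Set.ofList ids).contains x = ids.contains x := by
    intro ids x
    simp [PySem.Set.contains, PySem.Set.mem_ofList]
  have h1 : (fun (d : PySem.Dict String String) (k : String) =>
        if (PySem.Set.ofList train_id).contains k then d else d.erase k)
      = (fun d k => if train_id.contains k then d else d.erase k) := by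
    funext d k; rw [hmem]
  have h2 : (fun (d : PySem.Dict String String) (k : String) =>
        if (PySem.Set.ofList test_id).contains k then d else d.erase k)
      = (fun d k => if test_id.contains k then d else d.erase k) := by
    funext d k; rw [hmem]
  simp only [pv_pair_fold, h1, h2,
    pv_prune_items (fun k => train_id.contains k),
    pv_prune_items (fun k => test_id.contains k)]
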